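-- pv_equiv track=rewrite | github.com/IT22215574/final_year_research | backend/model_train.py | parse_date_from_filename
-- ===== SOURCE A (Python) =====
-- def parse_date_from_filename(filename):
--     """Extract year, month, week from filename"""
--     filename = filename.replace('.csv', '')
--
--     # Month mapping
--     month_map = {
--         'Jan': 1, 'Feb': 2, 'Mar': 3, 'mar': 3, 'Apr': 4,
--         'May': 5, 'June': 6, 'July': 7, 'Aug': 8,
--         'Sep': 9, 'Oct': 10, 'Nov': 11, 'Dec': 12
--     }
--
--     # Extract components
--     parts = filename.split('_')
--     month = None
--     week = None
--     year = None
--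
--     for i, part in enumerate(parts):
--         # Find month
--         for m_name, m_num in month_map.items():
--             if m_name in part:
--                 month = m_num
--                 break
--
--         # Find week number
--         if 'week' in part.lower() and i > 0:
--             week_part = parts[i-1]
--             if '1st' in week_part:
--                 week = 1
--             elif '2nd' in week_part:
--                 week = 2
--             elif '3rd' in week_part or '3nd' in week_part:
--                 week = 3
--             elif '4th' in week_part:
--                 week = 4
--
--         # Find year
--         if part.isdigit() and len(part) == 4:
--             year = int(part)
--
--     return year, month, week
-- ===== SOURCE B (Python) =====
-- def parse_date_from_filename(filename):
--     """Extract year, month, week from filename"""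
--     parts = filename.replace('.csv', '').split('_')
--
--     month_names = [('Jan', 1), ('Feb', 2), ('Mar', 3), ('mar', 3), ('Apr', 4),
--                    ('May', 5), ('June', 6), ('July', 7), ('Aug', 8),
--                    ('Sep', 9), ('Oct', 10), ('Nov', 11), ('Dec', 12)]
--     week_tags = [('1st', 1), ('2nd', 2), ('3rd', 3), ('3nd', 3), ('4th', 4)]
--
--     def month_of(p):
--         for name, num in month_names:
--             if name in p:
--                 return num
--         return None
--
--     def week_of(p):
--         for tag, num in week_tags:
--             if tag in p:
--                 return num
--         return None
--
--     # Each field independently: scan from the end and stop at the first hit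
--     # (equivalent to "last match wins" in a forward scan).
--     year = None
--     for p in reversed(parts):
--         if p.isdigit() and len(p) == 4:
--             year = int(p)
--             break
--
--     month = None
--     for p in reversed(parts):
--         m = month_of(p)
--         if m is not None:
--             month = m
--             break
--
--     week = None
--     for prev, cur in reversed(list(zip(parts, parts[1:]))):
--         if 'week' in cur.lower():
--             w = week_of(prev)
--             if w is not None:
--                 week = w
--                 break
--
--     return year, month, week
-- ===== Notes on version B (the rewrite author's own statement) =====
-- stated objective: alternative
-- what changed: A's single interleaved indexed forward loop (with predecessor lookup parts[i-1] and last-match-wins overwriting) is replaced by three independent backwards scans that each stop at the first hit: year and month scan reversed(parts), and the week scan walks reversed predecessor/current pairs from zip(parts, parts[1:]), so there is no index arithmetic and no overwriting state.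
import Mathlib
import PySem

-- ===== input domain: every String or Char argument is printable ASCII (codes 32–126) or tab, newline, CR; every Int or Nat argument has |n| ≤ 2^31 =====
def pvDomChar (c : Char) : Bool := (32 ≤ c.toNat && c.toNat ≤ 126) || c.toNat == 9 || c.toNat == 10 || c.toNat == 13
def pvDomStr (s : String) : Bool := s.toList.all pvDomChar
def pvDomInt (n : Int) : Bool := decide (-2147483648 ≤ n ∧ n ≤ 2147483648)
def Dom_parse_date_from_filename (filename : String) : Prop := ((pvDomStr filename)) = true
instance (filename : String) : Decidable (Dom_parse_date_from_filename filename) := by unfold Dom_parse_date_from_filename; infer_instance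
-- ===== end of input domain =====

-- B replaces A's single interleaved indexed loop by three independent backwards
-- scans (first hit from the end = last match of A's forward loop); objective: alternative.

-- ===== PORT A =====
def pvMonthMap : List (String × Int) :=
  [("Jan", 1), ("Feb", 2), ("Mar", 3), ("mar", 3), ("Apr", 4),
   ("May", 5), ("June", 6), ("July", 7), ("Aug", 8),
   ("Sep", 9), ("Oct", 10), ("Nov", 11), ("Dec", 12)]

-- A's loop body, one step of the fold over `enumerate(parts)`; state = (month, week, year)
def pvStepA (parts : List String) (st : Option Int × Option Int × Option Int)
    (pi : String × Nat) : Option Int × Option Int × Option Int :=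
  let part := pi.1
  let i := pi.2
  let month :=
    match pvMonthMap.find? (fun mv => PySem.Str.isIn mv.1 part) with
    | some mv => some mv.2
    | none => st.1
  let week :=
    if PySem.Str.isIn "week" (PySem.Str.lower part) && decide (0 < i) then
      let week_part := PySem.List.pyGetD parts ((i : Int) - 1) ""
      if PySem.Str.isIn "1st" week_part then some 1
      else if PySem.Str.isIn "2nd" week_part then some 2
      else if PySem.Str.isIn "3rd" week_part || PySem.Str.isIn "3nd" week_part then some 3
      else if PySem.Str.isIn "4th" week_part then some 4
      else st.2.1
    else st.2.1
  let year :=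
    if PySem.Str.strIsdigit part && (PySem.Str.len part == 4) then PySem.Int.ofStr? part
    else st.2.2
  (month, week, year)

def parse_date_from_filename (filename : String) : Option Int × Option Int × Option Int :=
  let fn := PySem.Str.replace filename ".csv" ""
  let parts := (PySem.Str.split? fn "_").getD []   -- sep "_" ≠ "", never none
  let st := (List.zipIdx parts 0).foldl (pvStepA parts) (none, none, none)
  (st.2.2, st.1, st.2.1)

-- ===== PORT B =====
def pvWeekTags : List (String × Int) :=
  [("1st", 1), ("2nd", 2), ("3rd", 3), ("3nd", 3), ("4th", 4)]

def pvMonthOf (p : String) : Option Int :=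
  (pvMonthMap.find? (fun mv => PySem.Str.isIn mv.1 p)).map (·.2)

def pvWeekOf (p : String) : Option Int :=
  (pvWeekTags.find? (fun tv => PySem.Str.isIn tv.1 p)).map (·.2)

def parse_date_from_filename_alt (filename : String) : Option Int × Option Int × Option Int :=
  let parts := (PySem.Str.split? (PySem.Str.replace filename ".csv" "") "_").getD []
  let year :=
    match parts.reverse.find? (fun p => PySem.Str.strIsdigit p && (PySem.Str.len p == 4)) with
    | some p => PySem.Int.ofStr? p
    | none => none
  let month :=
    match parts.reverse.find? (fun p => (pvMonthOf p).isSome) with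
    | some p => pvMonthOf p
    | none => none
  let pairs := parts.zip (PySem.List.slice parts (some 1) none)
  let week :=
    match pairs.reverse.find? (fun pc => PySem.Str.isIn "week" (PySem.Str.lower pc.2) && (pvWeekOf pc.1).isSome) with
    | some pc => pvWeekOf pc.1
    | none => none
  (year, month, week)

-- ===== PRECONDITION & SPEC =====
def Spec_parse_date_from_filename (filename : String) (out : Option Int × Option Int × Option Int) : Prop := out = parse_date_from_filename_alt filename
instance (filename : String) (out : Option Int × Option Int × Option Int) : Decidable (Spec_parse_date_from_filename filename out) := by unfold Spec_parse_date_from_filename; infer_instance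

-- ===== CLAIM (what is proved, stated in full; the proofs are below) =====
def Claim_equal_parse_date_from_filename : Prop := ∀ (filename : String), Dom_parse_date_from_filename filename → Spec_parse_date_from_filename filename (parse_date_from_filename filename)

-- ===== LEMMAS AND PROOFS =====

-- per-element update functions, one per component of A's state
def pvFMonth (p : String) : Option (Option Int) := (pvMonthOf p).map some

def pvFYear (p : String) : Option (Option Int) :=
  if PySem.Str.strIsdigit p && (PySem.Str.len p == 4) then some (PySem.Int.ofStr? p) else none

def pvFWeek (pc : String × String) : Option (Option Int) :=
  if PySem.Str.isIn "week" (PySem.Str.lower pc.2) then (pvWeekOf pc.1).map some else none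

-- a forward "last match wins" fold is the first hit of a backwards scan
theorem pv_foldl_getD_last {α β : Type} (f : α → Option β) (xs : List α) (b : β) :
    xs.foldl (fun acc x => (f x).getD acc) b
      = ((xs.reverse.find? (fun x => (f x).isSome)).bind f).getD b := by
  induction xs generalizing b with
  | nil => simp
  | cons x xs ih =>
    simp only [List.foldl_cons, List.reverse_cons, List.find?_append, ih]
    cases hf : xs.reverse.find? (fun x => (f x).isSome) with
    | some y =>
      have hy := List.find?_some hf
      cases hfy : f y with
      | none => simp [hfy] at hy
      | some v => simp [hfy]
    | none =>
      cases hfx : f x with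
      | none => simp [hfx]
      | some v => simp [hfx]

-- A's step written componentwise through pvFMonth / pvFWeek / pvFYear
theorem pv_stepA_eq (parts : List String) (st : Option Int × Option Int × Option Int)
    (pi : String × Nat) :
    pvStepA parts st pi =
      ((pvFMonth pi.1).getD st.1,
       (if 0 < pi.2 then
          (pvFWeek (PySem.List.pyGetD parts ((pi.2 : Int) - 1) "", pi.1)).getD st.2.1
        else st.2.1),
       (pvFYear pi.1).getD st.2.2) := by
  obtain ⟨part, i⟩ := pi
  simp only [pvStepA, pvFMonth, pvFYear, pvFWeek, pvMonthOf, pvWeekOf, pvWeekTags]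
  refine Prod.ext ?_ (Prod.ext ?_ ?_)
  · cases pvMonthMap.find? (fun mv => PySem.Str.isIn mv.1 part) <;> simp
  · by_cases hg : PySem.Chars.isIn ['w','e','e','k'] (PySem.Chars.lower part.toList) = true
    · by_cases hi : 0 < i
      · set wp := PySem.List.pyGetD parts ((i : Int) - 1) "" with hwp
        cases h1 : PySem.Chars.isIn ['1','s','t'] wp.toList <;>
          cases h2 : PySem.Chars.isIn ['2','n','d'] wp.toList <;>
            cases h3 : PySem.Chars.isIn ['3','r','d'] wp.toList <;>
              cases h3' : PySem.Chars.isIn ['3','n','d'] wp.toList <;>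
                cases h4 : PySem.Chars.isIn ['4','t','h'] wp.toList <;>
                  simp [List.find?, hg, hi, h1, h2, h3, h3', h4]
      · simp [hg, hi]
    · simp [hg]
  · cases (PySem.Str.strIsdigit part && (PySem.Str.len part == 4)) <;> rfl

-- the triple fold splits into three independent folds
theorem pv_fold_split (parts : List String) (l : List (String × Nat))
    (m w y : Option Int) :
    l.foldl (pvStepA parts) (m, w, y)
      = (l.foldl (fun acc pi => (pvFMonth pi.1).getD acc) m,
         l.foldl (fun acc (pi : String × Nat) =>
            if 0 < pi.2 then
              (pvFWeek (PySem.List.pyGetD parts ((pi.2 : Int) - 1) "", pi.1)).getD acc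
            else acc) w,
         l.foldl (fun acc pi => (pvFYear pi.1).getD acc) y) := by
  induction l generalizing m w y with
  | nil => rfl
  | cons pi l ih => rw [List.foldl_cons, pv_stepA_eq]; exact ih _ _ _

-- a fold over zipIdx whose step only reads the element is a fold over the list
theorem pv_foldl_zipIdx_fst {β : Type} (g : β → String → β) (xs : List String)
    (k : Nat) (b : β) :
    (List.zipIdx xs k).foldl (fun acc pi => g acc pi.1) b = xs.foldl g b := by
  induction xs generalizing k b with
  | nil => rfl
  | cons x xs ih => simp only [List.zipIdx_cons, List.foldl_cons]; exact ih _ _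

-- the indexed week fold over a suffix is a fold over predecessor/current pairs
theorem pv_week_shift (full : List String) (suf : List String) :
    ∀ (k : Nat) (prev : String) (w : Option Int), 0 < k →
      full.drop (k - 1) = prev :: suf →
      (List.zipIdx suf k).foldl (fun acc (pi : String × Nat) =>
          if 0 < pi.2 then
            (pvFWeek (PySem.List.pyGetD full ((pi.2 : Int) - 1) "", pi.1)).getD acc
          else acc) w
        = ((prev :: suf).zip suf).foldl (fun acc pc => (pvFWeek pc).getD acc) w := by
  induction suf with
  | nil => intro k prev w _ _; rfl
  | cons c suf ih =>
    intro k prev w hk hdrop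
    have hget : PySem.List.pyGetD full ((k : Int) - 1) "" = prev := by
      have hcast : ((k : Int) - 1) = ((k - 1 : Nat) : Int) := by omega
      rw [hcast, PySem.List.pyGetD_natCast]
      have : full[k - 1]? = some prev := by
        have := List.getElem?_drop (xs := full) (i := k - 1) (j := 0)
        rw [hdrop] at this
        simpa using this.symm
      simp [List.getD_eq_getElem?_getD, this]
    have hdrop' : full.drop k = c :: suf := by
      have : full.drop (k - 1 + 1) = (full.drop (k - 1)).drop 1 := by
        rw [List.drop_drop]
      have hk1 : k - 1 + 1 = k := by omega
      rw [hk1] at this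
      rw [this, hdrop]
      rfl
    simp only [List.zipIdx_cons, List.foldl_cons, List.zip_cons_cons, hk, if_pos, hget]
    exact ih (k + 1) c _ (by omega) (by simpa using hdrop')

-- full statement of the week component: A's indexed fold = B's pair fold
theorem pv_week_eq (parts : List String) (w : Option Int) :
    (List.zipIdx parts 0).foldl (fun acc (pi : String × Nat) =>
        if 0 < pi.2 then
          (pvFWeek (PySem.List.pyGetD parts ((pi.2 : Int) - 1) "", pi.1)).getD acc
        else acc) w
      = (parts.zip parts.tail).foldl (fun acc pc => (pvFWeek pc).getD acc) w := by
  cases parts with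
  | nil => rfl
  | cons p rest =>
    simp only [List.zipIdx_cons, List.foldl_cons, Nat.lt_irrefl, if_false, List.tail_cons,
      Nat.zero_add]
    have := pv_week_shift (p :: rest) rest 1 p w (by omega) (by simp)
    simpa using this

-- the year component, as B computes it
theorem pv_year_comp (parts : List String) :
    parts.foldl (fun acc p => (pvFYear p).getD acc) none
      = (match parts.reverse.find? (fun p => PySem.Str.strIsdigit p && (PySem.Str.len p == 4)) with
         | some p => PySem.Int.ofStr? p
         | none => none) := by
  rw [pv_foldl_getD_last]
  rw [show (fun p => (pvFYear p).isSome)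
      = (fun p => PySem.Str.strIsdigit p && (PySem.Str.len p == 4)) from by
      funext p; unfold pvFYear; split_ifs with h <;> simp_all]
  cases h : parts.reverse.find? (fun p => PySem.Str.strIsdigit p && (PySem.Str.len p == 4)) with
  | none => simp
  | some p =>
    have hp := List.find?_some h
    unfold pvFYear; simp_all

-- the month component, as B computes it
theorem pv_month_comp (parts : List String) :
    parts.foldl (fun acc p => (pvFMonth p).getD acc) none
      = (match parts.reverse.find? (fun p => (pvMonthOf p).isSome) with
         | some p => pvMonthOf p
         | none => none) := by
  rw [pv_foldl_getD_last]
  rw [show (fun p => (pvFMonth p).isSome) = (fun p => (pvMonthOf p).isSome) from by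
      funext p; simp [pvFMonth]]
  cases h : parts.reverse.find? (fun p => (pvMonthOf p).isSome) with
  | none => simp
  | some p =>
    have hp := List.find?_some h
    cases hm : pvMonthOf p with
    | none => simp [hm] at hp
    | some v => simp [pvFMonth, hm]

-- the week component, as B computes it
theorem pv_week_comp (pairs : List (String × String)) :
    pairs.foldl (fun acc pc => (pvFWeek pc).getD acc) none
      = (match pairs.reverse.find? (fun pc =>
            PySem.Str.isIn "week" (PySem.Str.lower pc.2) && (pvWeekOf pc.1).isSome) with
         | some pc => pvWeekOf pc.1
         | none => none) := by
  rw [pv_foldl_getD_last]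
  rw [show (fun pc => (pvFWeek pc).isSome)
      = (fun pc : String × String =>
          PySem.Str.isIn "week" (PySem.Str.lower pc.2) && (pvWeekOf pc.1).isSome) from by
      funext pc; unfold pvFWeek; split_ifs with h <;> simp_all]
  cases h : pairs.reverse.find? (fun pc =>
      PySem.Str.isIn "week" (PySem.Str.lower pc.2) && (pvWeekOf pc.1).isSome) with
  | none => simp
  | some pc =>
    have hp := List.find?_some h
    simp only [Bool.and_eq_true] at hp
    cases hw : pvWeekOf pc.1 with
    | none => simp [hw] at hp
    | some v => unfold pvFWeek; simp_all

-- everything assembled over an arbitrary parts list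
theorem pv_main (parts : List String) :
    (((List.zipIdx parts 0).foldl (pvStepA parts) (none, none, none)).2.2,
     ((List.zipIdx parts 0).foldl (pvStepA parts) (none, none, none)).1,
     ((List.zipIdx parts 0).foldl (pvStepA parts) (none, none, none)).2.1)
    = ((match parts.reverse.find? (fun p => PySem.Str.strIsdigit p && (PySem.Str.len p == 4)) with
        | some p => PySem.Int.ofStr? p
        | none => none),
       (match parts.reverse.find? (fun p => (pvMonthOf p).isSome) with
        | some p => pvMonthOf p
        | none => none),
       (match (parts.zip (PySem.List.slice parts (some 1) none)).reverse.find? (fun pc =>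
            PySem.Str.isIn "week" (PySem.Str.lower pc.2) && (pvWeekOf pc.1).isSome) with
        | some pc => pvWeekOf pc.1
        | none => none)) := by
  have hslice : PySem.List.slice parts (some 1) none = parts.tail := by
    rw [PySem.List.slice_from parts (by norm_num : (0:Int) ≤ 1)]
    simp [List.drop_one]
  rw [hslice, pv_fold_split]
  refine Prod.ext ?_ (Prod.ext ?_ ?_)
  · show (List.zipIdx parts 0).foldl
        (fun acc pi => (pvFYear pi.1).getD acc) none = _
    rw [pv_foldl_zipIdx_fst (fun acc p => (pvFYear p).getD acc), pv_year_comp]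
  · show (List.zipIdx parts 0).foldl
        (fun acc pi => (pvFMonth pi.1).getD acc) none = _
    rw [pv_foldl_zipIdx_fst (fun acc p => (pvFMonth p).getD acc), pv_month_comp]
  · show (List.zipIdx parts 0).foldl _ none = _
    rw [pv_week_eq, pv_week_comp]

-- ===== VERDICT (by name: the statement is the Claim_ definition above) =====
theorem parse_date_from_filename_spec : Claim_equal_parse_date_from_filename := by
  intro filename _
  show parse_date_from_filename filename = parse_date_from_filename_alt filename
  simp only [parse_date_from_filename, parse_date_from_filename_alt]
  exact pv_main ((PySem.Str.split? (PySem.Str.replace filename ".csv" "") "_").getD [])
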